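-- pv_equiv track=rewrite | github.com/WerWojtas/Algorithms-and-Data-Structures | Colloquiums_Exams/2021_2022_kol_u/kol_u.py | swaps
-- ===== SOURCE A (Python) =====
-- def swaps( disk, depends ):
--     n=len(disk)
--     TO_DO1=[0 for _ in range(n)]
--     TO_DO2=[0 for _ in range(n)]
--     G=[[] for _ in range(n)]
--     ROOTS1=[[],[]]
--     ROOTS2=[[],[]]
--
--
--
--     def DFS_Visit(Graph,TO_DO,ROOTS,vertex,case,flag):
--
--
--         for j in range (len(Graph[vertex])):
--             neighbour=Graph[vertex][j]
--             TO_DO[neighbour]-=1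
--
--             if TO_DO[neighbour]==0:
--                 if disk[neighbour]==case:
--                     DFS_Visit(Graph,TO_DO,ROOTS,neighbour,case,flag)
--                 else:
--                     ROOTS[flag].append(neighbour)
--
--
--
--
--     for i in range(n):
--         leng=len(depends[i])
--         TO_DO1[i]=leng
--         TO_DO2[i]=leng
--         if leng==0:
--             if disk[i]=="A":
--                 ROOTS1[0].append(i)
--                 ROOTS2[0].append(i)
--             else:
--                 ROOTS1[1].append(i)
--                 ROOTS2[1].append(i)
--         else:
--             for j in range(leng):
--                 G[depends[i][j]].append(i)
--
--
--
--
--     sum1=-1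
--     while len( ROOTS1[0])!=0 or len( ROOTS1[1])!=0:
--
--         if len( ROOTS1[0])!=0:
--             sum1+=1
--             for j in range(len(ROOTS1[0])):
--                 root=ROOTS1[0][j]
--                 DFS_Visit(G,TO_DO1,ROOTS1,root,"A",1)
--             ROOTS1[0]=[]
--
--         elif len(ROOTS1[1])!=0:
--             sum1+=1
--             for j in range(len(ROOTS1[1])):
--                 root=ROOTS1[1][j]
--                 DFS_Visit(G,TO_DO1,ROOTS1,root,"B",0)
--             ROOTS1[1]=[]
--
--     sum2=-1
--     while len( ROOTS2[0])!=0 or len( ROOTS2[1])!=0: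
--         if len( ROOTS2[1])!=0:
--             sum2+=1
--             for j in range(len(ROOTS2[1])):
--                 root=ROOTS2[1][j]
--                 DFS_Visit(G,TO_DO2,ROOTS2,root,"B",0)
--             ROOTS2[1]=[]
--         elif len(ROOTS2[0])!=0:
--             sum2+=1
--             for j in range(len(ROOTS2[0])):
--                 root=ROOTS2[0][j]
--                 DFS_Visit(G,TO_DO2,ROOTS2,root,"A",1)
--             ROOTS2[0]=[]
--
--     sum=min(sum1,sum2)
--     return sum
-- ===== SOURCE B (Python) =====
-- def swaps(disk, depends):
--     # Iterative re-implementation: explicit stack of pending-neighbour lists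
--     # instead of recursion, and one parametrised batch runner called twice
--     # instead of two duplicated while-loops.
--     n = len(disk)
--     G = [[] for _ in range(n)]
--     rootsA = []
--     rootsB = []
--     for i in range(n):
--         deps = depends[i]
--         if deps:
--             for d in deps:
--                 G[d].append(i)
--         else:
--             if disk[i] == "A":
--                 rootsA.append(i)
--             else:
--                 rootsB.append(i)
--     indeg = [len(depends[i]) for i in range(n)]
--
--     def run(first):
--         todo = list(indeg)
--         roots = [list(rootsA), list(rootsB)]
--         total = -1
--         while roots[0] or roots[1]:
--             g = first if roots[first] else 1 - first
--             case = "A" if g == 0 else "B"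
--             nxt = 1 - g
--             for root in roots[g]:
--                 stack = [list(G[root])]
--                 while stack:
--                     rem = stack.pop()
--                     if rem:
--                         nb = rem[0]
--                         stack.append(rem[1:])
--                         todo[nb] -= 1
--                         if todo[nb] == 0:
--                             if disk[nb] == case:
--                                 stack.append(list(G[nb]))
--                             else:
--                                 roots[nxt].append(nb)
--             roots[g] = []
--             total += 1
--         return total
--
--     return min(run(0), run(1))
-- ===== Notes on version B (the rewrite author's own statement) =====
-- stated objective: alternative
-- what changed: The recursive DFS_Visit is replaced by an explicit stack machine of pending-neighbour lists (no recursion, so no RecursionError on deep chains), and the two duplicated A-biased/B-biased while-loops are replaced by one parametrised batch runner called twice.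
-- outside the precondition, e.g. on swaps(['A'], []): A raises IndexError, B raises IndexError; on swaps(['A', 'B'], [[], [5]]): A raises IndexError, B raises IndexError
import Mathlib
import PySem

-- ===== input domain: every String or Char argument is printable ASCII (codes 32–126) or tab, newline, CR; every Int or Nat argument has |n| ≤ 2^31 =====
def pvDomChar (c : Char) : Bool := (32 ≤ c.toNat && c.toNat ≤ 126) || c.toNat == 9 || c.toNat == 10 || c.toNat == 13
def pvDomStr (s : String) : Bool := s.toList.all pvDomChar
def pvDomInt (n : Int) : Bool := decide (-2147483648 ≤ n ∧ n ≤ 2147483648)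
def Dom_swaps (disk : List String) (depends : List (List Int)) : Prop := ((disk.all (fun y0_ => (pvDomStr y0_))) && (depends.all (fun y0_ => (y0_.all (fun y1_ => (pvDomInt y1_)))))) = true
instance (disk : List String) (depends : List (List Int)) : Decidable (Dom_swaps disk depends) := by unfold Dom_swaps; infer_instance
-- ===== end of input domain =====

-- B rewrites A's recursive DFS as an explicit stack of pending-neighbour lists and replaces the
-- two duplicated while-loops by one parametrised batch runner (objective: alternative structure).

-- ===== PORT A =====
-- DFS_Visit: the fuel argument only makes the recursion structurally total; at the fuel
-- the port passes (disk.length + 1) it is never exhausted on inputs satisfying Pre_.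
def pvVisit (disk : List String) (G : List (List Int)) (case : String) :
    Nat → List Int → List Int × List Int → List Int × List Int
  | 0, _, s => s
  | f+1, l, s =>
    l.foldl (fun s nb =>
      let todo' := PySem.List.pySetD s.1 nb (PySem.List.pyGetD s.1 nb 0 - 1)
      if PySem.List.pyGetD todo' nb 0 = 0 then
        if PySem.List.pyGetD disk nb "" = case then
          pvVisit disk G case f (PySem.List.pyGetD G nb []) (todo', s.2)
        else (todo', s.2 ++ [nb])
      else (todo', s.2)) s


-- the body of A's setup loop; state (TO_DO1, TO_DO2, G, ROOTS1, ROOTS2)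
def pvBodyA (disk : List String) (depends : List (List Int))
    (st : List Int × List Int × List (List Int) × (List Int × List Int) × (List Int × List Int)) (i : Int) :
    List Int × List Int × List (List Int) × (List Int × List Int) × (List Int × List Int) :=
  let deps := PySem.List.pyGetD depends i []
  let leng : Int := deps.length
  let t1 := PySem.List.pySetD st.1 i leng
  let t2 := PySem.List.pySetD st.2.1 i leng
  if leng = 0 then
    if PySem.List.pyGetD disk i "" = "A" then
      (t1, t2, st.2.2.1, (st.2.2.2.1.1 ++ [i], st.2.2.2.1.2), (st.2.2.2.2.1 ++ [i], st.2.2.2.2.2))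
    else
      (t1, t2, st.2.2.1, (st.2.2.2.1.1, st.2.2.2.1.2 ++ [i]), (st.2.2.2.2.1, st.2.2.2.2.2 ++ [i]))
  else
    (t1, t2,
     deps.foldl (fun g d => PySem.List.pySetD g d (PySem.List.pyGetD g d [] ++ [i])) st.2.2.1,
     st.2.2.2.1, st.2.2.2.2)

def pvBuildA (disk : List String) (depends : List (List Int)) :
    List Int × List Int × List (List Int) × (List Int × List Int) × (List Int × List Int) :=
  let n := disk.length
  (PySem.List.pyRange 0 n 1).foldl (pvBodyA disk depends)
    (List.replicate n 0, List.replicate n 0, List.replicate n ([] : List Int),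
     (([] : List Int), ([] : List Int)), (([] : List Int), ([] : List Int)))

-- the first while loop (checks ROOTS[0] first); fuel disk.length + 1 bounds the iterations
def pvLoop1 (disk : List String) (G : List (List Int)) :
    Nat → List Int → List Int → List Int → Int → Int
  | 0, _, _, _, acc => acc
  | f+1, todo, r0, r1, acc =>
    if r0 ≠ [] then
      let s := r0.foldl (fun st root => pvVisit disk G "A" (disk.length + 1) (PySem.List.pyGetD G root []) st) (todo, r1)
      pvLoop1 disk G f s.1 [] s.2 (acc + 1)
    else if r1 ≠ [] then
      let s := r1.foldl (fun st root => pvVisit disk G "B" (disk.length + 1) (PySem.List.pyGetD G root []) st) (todo, r0)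
      pvLoop1 disk G f s.1 s.2 [] (acc + 1)
    else acc

-- the second while loop (checks ROOTS[1] first)
def pvLoop2 (disk : List String) (G : List (List Int)) :
    Nat → List Int → List Int → List Int → Int → Int
  | 0, _, _, _, acc => acc
  | f+1, todo, r0, r1, acc =>
    if r1 ≠ [] then
      let s := r1.foldl (fun st root => pvVisit disk G "B" (disk.length + 1) (PySem.List.pyGetD G root []) st) (todo, r0)
      pvLoop2 disk G f s.1 s.2 [] (acc + 1)
    else if r0 ≠ [] then
      let s := r0.foldl (fun st root => pvVisit disk G "A" (disk.length + 1) (PySem.List.pyGetD G root []) st) (todo, r1)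
      pvLoop2 disk G f s.1 [] s.2 (acc + 1)
    else acc

def swaps (disk : List String) (depends : List (List Int)) : Int :=
  let st := pvBuildA disk depends
  let sum1 := pvLoop1 disk st.2.2.1 (disk.length + 1) st.1 st.2.2.2.1.1 st.2.2.2.1.2 (-1)
  let sum2 := pvLoop2 disk st.2.2.1 (disk.length + 1) st.2.1 st.2.2.2.2.1 st.2.2.2.2.2 (-1)
  min sum1 sum2

-- ===== PORT B =====
-- termination weight base for the explicit stack: strictly larger than any adjacency list of G
def pvAltC (G : List (List Int)) : Nat :=
  (G.foldl (fun acc l => max acc l.length) 0) + 2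

theorem pvAltC_len (G : List (List Int)) (i : Int) :
    (PySem.List.pyGetD G i []).length + 2 ≤ pvAltC G := by
  unfold pvAltC
  by_cases h : PySem.Raise.InRange G.length i
  · have hm := PySem.List.pyGetD_mem G (d := []) h
    have := (PySem.List.le_foldl_max_nat G List.length 0).2 _ hm
    omega
  · rw [PySem.List.pyGetD_of_none _ _ _ ((PySem.List.pyGet?_eq_none_iff G i).mpr h)]
    simp

def pvW (G : List (List Int)) (p : Nat × List Int) : Nat := (pvAltC G) ^ p.1 * (p.2.length + 1)

theorem pvDec_pop (G : List (List Int)) (f : Nat) (l : List Int) (k : List (Nat × List Int)) :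
    (k.map (pvW G)).sum < (((f, l) :: k).map (pvW G)).sum := by
  simp only [List.map_cons, List.sum_cons, pvW]
  have : 0 < pvAltC G ^ f * (l.length + 1) :=
    Nat.mul_pos (Nat.pow_pos (by unfold pvAltC; omega)) (Nat.succ_pos _)
  omega

theorem pvDec_sib (G : List (List Int)) (f : Nat) (nb : Int) (rest : List Int)
    (k : List (Nat × List Int)) :
    (((f + 1, rest) :: k).map (pvW G)).sum < (((f + 1, nb :: rest) :: k).map (pvW G)).sum := by
  simp only [List.map_cons, List.sum_cons, pvW, List.length_cons]
  have : 0 < pvAltC G ^ (f + 1) := Nat.pow_pos (by unfold pvAltC; omega)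
  nlinarith

theorem pvDec_dive (G : List (List Int)) (f : Nat) (nb : Int) (rest : List Int)
    (k : List (Nat × List Int)) :
    (((f, PySem.List.pyGetD G nb []) :: (f + 1, rest) :: k).map (pvW G)).sum
      < (((f + 1, nb :: rest) :: k).map (pvW G)).sum := by
  simp only [List.map_cons, List.sum_cons, pvW, List.length_cons]
  have hc := pvAltC_len G nb
  have ha : 0 < pvAltC G ^ f := Nat.pow_pos (by unfold pvAltC; omega)
  have hp : pvAltC G ^ (f + 1) = pvAltC G ^ f * pvAltC G := pow_succ _ _
  nlinarith

def pvAltMachine (disk : List String) (G : List (List Int)) (case : String) :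
    List (Nat × List Int) → List Int × List Int → List Int × List Int
  | [], s => s
  | (_, []) :: k, s => pvAltMachine disk G case k s
  | (0, _ :: _) :: k, s => pvAltMachine disk G case k s
  | (f+1, nb :: rest) :: k, s =>
    let todo' := PySem.List.pySetD s.1 nb (PySem.List.pyGetD s.1 nb 0 - 1)
    if PySem.List.pyGetD todo' nb 0 = 0 then
      if PySem.List.pyGetD disk nb "" = case then
        pvAltMachine disk G case ((f, PySem.List.pyGetD G nb []) :: (f+1, rest) :: k) (todo', s.2)
      else
        pvAltMachine disk G case ((f+1, rest) :: k) (todo', s.2 ++ [nb])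
    else
      pvAltMachine disk G case ((f+1, rest) :: k) (todo', s.2)
  termination_by k _ => (k.map (pvW G)).sum
  decreasing_by
    · exact pvDec_pop G _ _ k
    · exact pvDec_pop G _ _ k
    · exact pvDec_dive G f nb rest k
    · exact pvDec_sib G f nb rest k
    · exact pvDec_sib G f nb rest k


-- the body of B's setup loop; state (G, rootsA, rootsB)
def pvBodyAlt (disk : List String) (depends : List (List Int))
    (st : List (List Int) × List Int × List Int) (i : Int) :
    List (List Int) × List Int × List Int :=
  let deps := PySem.List.pyGetD depends i []
  if deps ≠ [] then
    (deps.foldl (fun g d => PySem.List.pySetD g d (PySem.List.pyGetD g d [] ++ [i])) st.1,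
     st.2.1, st.2.2)
  else if PySem.List.pyGetD disk i "" = "A" then (st.1, st.2.1 ++ [i], st.2.2)
  else (st.1, st.2.1, st.2.2 ++ [i])

def pvBuildAlt (disk : List String) (depends : List (List Int)) :
    List (List Int) × List Int × List Int :=
  (PySem.List.pyRange 0 disk.length 1).foldl (pvBodyAlt disk depends)
    (List.replicate disk.length ([] : List Int), ([] : List Int), ([] : List Int))

-- indeg = [len(depends[i]) for i in range(n)]
def pvIndeg (disk : List String) (depends : List (List Int)) : List Int :=
  (PySem.List.pyRange 0 disk.length 1).map
    (fun i => ((PySem.List.pyGetD depends i []).length : Int))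

-- the parametrised batch runner: first = 0 favours group "A", first = 1 favours "B"
def pvAltRun (disk : List String) (G : List (List Int)) (first : Nat) :
    Nat → List Int → List Int → List Int → Int → Int
  | 0, _, _, _, total => total
  | fo+1, todo, r0, r1, total =>
    if r0 = [] ∧ r1 = [] then total
    else
      let g := if (if first = 0 then r0 else r1) ≠ [] then first else 1 - first
      let case := if g = 0 then "A" else "B"
      let cur := if g = 0 then r0 else r1
      let acc := if g = 0 then r1 else r0
      let s := cur.foldl (fun st root =>
          pvAltMachine disk G case [(disk.length + 1, PySem.List.pyGetD G root [])] st) (todo, acc)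
      if g = 0 then pvAltRun disk G first fo s.1 [] s.2 (total + 1)
      else pvAltRun disk G first fo s.1 s.2 [] (total + 1)

def swaps_alt (disk : List String) (depends : List (List Int)) : Int :=
  let b := pvBuildAlt disk depends
  let indeg := pvIndeg disk depends
  min (pvAltRun disk b.1 0 (disk.length + 1) indeg b.2.1 b.2.2 (-1))
      (pvAltRun disk b.1 1 (disk.length + 1) indeg b.2.1 b.2.2 (-1))

-- ===== PRECONDITION & SPEC =====
-- Pre_ excludes exactly the inputs on which the Python A raises IndexError: a depends
-- list shorter than disk, or a dependency index outside [-n, n) (n = len(disk)).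
def Pre_swaps (disk : List String) (depends : List (List Int)) : Prop :=
  disk.length ≤ depends.length ∧
    ∀ l ∈ depends.take disk.length, ∀ d ∈ l, PySem.Raise.InRange disk.length d
instance (disk : List String) (depends : List (List Int)) : Decidable (Pre_swaps disk depends) := by
  unfold Pre_swaps; infer_instance

def pvWitness_swaps : List String × List (List Int) := (["A", "B"], [[], [0]])

def Spec_swaps (disk : List String) (depends : List (List Int)) (out : Int) : Prop := out = swaps_alt disk depends
instance (disk : List String) (depends : List (List Int)) (out : Int) : Decidable (Spec_swaps disk depends out) := by unfold Spec_swaps; infer_instance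

-- ===== CLAIM (what is proved, stated in full; the proofs are below) =====
def Claim_equal_swaps : Prop := ∀ (disk : List String) (depends : List (List Int)), Dom_swaps disk depends → Pre_swaps disk depends → Spec_swaps disk depends (swaps disk depends)

-- ===== LEMMAS AND PROOFS =====

-- the stack machine runs its top frame exactly as the recursive DFS does
theorem pvAltMachine_eq_pvVisit (disk : List String) (G : List (List Int)) (case : String) :
    ∀ (f : Nat) (l : List Int) (k : List (Nat × List Int)) (s : List Int × List Int),
      pvAltMachine disk G case ((f, l) :: k) s = pvAltMachine disk G case k (pvVisit disk G case f l s) := by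
  intro f
  induction f with
  | zero =>
    intro l k s
    cases l with
    | nil => rw [pvAltMachine, pvVisit]
    | cons nb rest => rw [pvAltMachine, pvVisit]
  | succ f ih =>
    intro l
    induction l with
    | nil => intro k s; rw [pvAltMachine, pvVisit]; rfl
    | cons nb rest ihl =>
      intro k s
      have hs : ∀ (x : List Int × List Int),
          pvVisit disk G case (f + 1) rest x = List.foldl
            (fun s nb =>
              let todo' := PySem.List.pySetD s.1 nb (PySem.List.pyGetD s.1 nb 0 - 1)
              if PySem.List.pyGetD todo' nb 0 = 0 then
                if PySem.List.pyGetD disk nb "" = case then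
                  pvVisit disk G case f (PySem.List.pyGetD G nb []) (todo', s.2)
                else (todo', s.2 ++ [nb])
              else (todo', s.2)) x rest := by
        intro x; rw [pvVisit]
      rw [pvAltMachine, pvVisit, List.foldl_cons]
      by_cases hz : PySem.List.pyGetD (PySem.List.pySetD s.1 nb (PySem.List.pyGetD s.1 nb 0 - 1)) nb 0 = 0
      · by_cases hcase : PySem.List.pyGetD disk nb "" = case
        · simp only [hz, hcase, if_true]
          rw [ih, ← hs]
          exact ihl _ _
        · simp only [hz, hcase, if_true, if_false]
          rw [← hs]
          exact ihl _ _
      · simp only [hz, if_false]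
        rw [← hs]
        exact ihl _ _

theorem pvAltMachine_single (disk : List String) (G : List (List Int)) (case : String)
    (f : Nat) (l : List Int) (s : List Int × List Int) :
    pvAltMachine disk G case [(f, l)] s = pvVisit disk G case f l s := by
  rw [pvAltMachine_eq_pvVisit, pvAltMachine]

theorem pvAltRun_zero_eq (disk : List String) (G : List (List Int)) :
    ∀ (fo : Nat) (todo r0 r1 : List Int) (total : Int),
      pvAltRun disk G 0 fo todo r0 r1 total = pvLoop1 disk G fo todo r0 r1 total := by
  intro fo
  induction fo with
  | zero => intro todo r0 r1 total; rw [pvAltRun, pvLoop1]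
  | succ fo ih =>
    intro todo r0 r1 total
    rw [pvAltRun, pvLoop1]
    by_cases h0 : r0 = [] <;> by_cases h1 : r1 = [] <;>
      simp [h0, h1, pvAltMachine_single, ih]

theorem pvAltRun_one_eq (disk : List String) (G : List (List Int)) :
    ∀ (fo : Nat) (todo r0 r1 : List Int) (total : Int),
      pvAltRun disk G 1 fo todo r0 r1 total = pvLoop2 disk G fo todo r0 r1 total := by
  intro fo
  induction fo with
  | zero => intro todo r0 r1 total; rw [pvAltRun, pvLoop2]
  | succ fo ih =>
    intro todo r0 r1 total
    rw [pvAltRun, pvLoop2]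
    by_cases h0 : r0 = [] <;> by_cases h1 : r1 = [] <;>
      simp [h0, h1, pvAltMachine_single, ih]

-- the indegree assignments of A's setup loop, isolated
def pvBodyT (depends : List (List Int)) (t : List Int) (i : Int) : List Int :=
  PySem.List.pySetD t i ((PySem.List.pyGetD depends i []).length : Int)

-- A's setup loop splits into the indegree fold and B's setup fold
theorem pvBuildA_gen (disk : List String) (depends : List (List Int)) :
    ∀ (l : List Int) (t : List Int) (G : List (List Int)) (a b : List Int),
      l.foldl (pvBodyA disk depends) (t, t, G, (a, b), (a, b)) =
        (l.foldl (pvBodyT depends) t, l.foldl (pvBodyT depends) t,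
         (l.foldl (pvBodyAlt disk depends) (G, a, b)).1,
         ((l.foldl (pvBodyAlt disk depends) (G, a, b)).2.1,
          (l.foldl (pvBodyAlt disk depends) (G, a, b)).2.2),
         ((l.foldl (pvBodyAlt disk depends) (G, a, b)).2.1,
          (l.foldl (pvBodyAlt disk depends) (G, a, b)).2.2)) := by
  intro l
  induction l with
  | nil => intro t G a b; simp
  | cons i l ih =>
    intro t G a b
    simp only [List.foldl_cons]
    by_cases hd : PySem.List.pyGetD depends i [] = []
    · by_cases hA : PySem.List.pyGetD disk i "" = "A"
      · simp only [pvBodyA, pvBodyT, pvBodyAlt, hd, hA]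
        simp only [List.length_nil, Nat.cast_zero, ne_eq, not_true_eq_false,
          if_false, if_true]
        exact ih _ _ _ _
      · simp only [pvBodyA, pvBodyT, pvBodyAlt, hd, hA]
        simp only [List.length_nil, Nat.cast_zero, ne_eq, not_true_eq_false,
          if_false, if_true]
        exact ih _ _ _ _
    · have hlen : ((PySem.List.pyGetD depends i []).length : Int) ≠ 0 := by
        simpa using hd
      simp only [pvBodyA, pvBodyT, pvBodyAlt, if_neg hlen, ne_eq, hd, not_false_eq_true, if_pos]
      exact ih _ _ _ _

-- the indegree fold over range(n) is exactly the comprehension pvIndeg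
theorem pvTodo_fold (depends : List (List Int)) (n : Nat) :
    ∀ (k a : Nat) (t : List Int), a + k = n → t.length = n →
      (PySem.List.pyRange (a : Int) (n : Int) 1).foldl (pvBodyT depends) t
        = t.take a ++ (PySem.List.pyRange (a : Int) (n : Int) 1).map
            (fun i => ((PySem.List.pyGetD depends i []).length : Int)) := by
  intro k
  induction k with
  | zero =>
    intro a t ha ht
    rw [PySem.List.pyRange_one_eq_nil (by omega)]
    rw [List.take_of_length_le (by omega)]
    simp
  | succ k ih =>
    intro a t ha ht
    rw [PySem.List.pyRange_one_cons (by exact_mod_cast by omega)]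
    simp only [List.foldl_cons, List.map_cons]
    have hcast : ((a : Int) + 1) = ((a + 1 : Nat) : Int) := by push_cast; ring
    rw [hcast]
    have hlen : (pvBodyT depends t (a : Int)).length = n := by
      simp [pvBodyT, ht]
    rw [ih (a + 1) _ (by omega) hlen]
    have hset : pvBodyT depends t (a : Int) = t.set a ((PySem.List.pyGetD depends (a:Int) []).length : Int) := by
      simp [pvBodyT]
    rw [hset]
    have halt : a < t.length := by omega
    have htake : (t.set a ((PySem.List.pyGetD depends (a:Int) []).length : Int)).take (a+1)
        = t.take a ++ [((PySem.List.pyGetD depends (a:Int) []).length : Int)] := by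
      rw [List.set_eq_take_append_cons_drop, if_pos halt, List.take_append]
      simp [List.length_take, Nat.min_eq_left (le_of_lt halt), List.take_take]
    rw [htake]
    simp

theorem pvIndeg_fold (disk : List String) (depends : List (List Int)) :
    (PySem.List.pyRange 0 (disk.length : Int) 1).foldl (pvBodyT depends)
        (List.replicate disk.length (0 : Int)) = pvIndeg disk depends := by
  have := pvTodo_fold depends disk.length disk.length 0
    (List.replicate disk.length (0 : Int)) (by omega) (by simp)
  unfold pvIndeg
  simpa using this

theorem pvBuildA_eq (disk : List String) (depends : List (List Int)) :
    pvBuildA disk depends =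
      (pvIndeg disk depends, pvIndeg disk depends, (pvBuildAlt disk depends).1,
       ((pvBuildAlt disk depends).2.1, (pvBuildAlt disk depends).2.2),
       ((pvBuildAlt disk depends).2.1, (pvBuildAlt disk depends).2.2)) := by
  unfold pvBuildA pvBuildAlt
  rw [pvBuildA_gen, pvIndeg_fold]

-- ===== VERDICT (by name: the statement is the Claim_ definition above) =====
theorem swaps_spec : Claim_equal_swaps := by
  intro disk depends _ _
  unfold Spec_swaps swaps swaps_alt
  simp only [pvBuildA_eq, pvAltRun_zero_eq, pvAltRun_one_eq]
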